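-- pv_equiv track=rewrite | github.com/maisha815/Solitaire_Cypher | c_functions.py | validate_deck
-- ===== SOURCE A (Python) =====
-- def validate_deck(candidate_deck):
--     """(list of int) -> bool
--
--     Precondition: len(candidate_deck) >= 3
--
--     Return True iff candidate deck has every integer from 1 to the number
--     of cards in the deck. If it is not a valid deck, return False.
--
--     >>>validate_deck([1,3,4,5,2,6,9,7,8])
--     True
--     >>>validate_deck([1,5,2,3])
--     False
--
--     """
--     already_checked = []
--     flag = True
--
--     for number in candidate_deck:
--         if (number > len(candidate_deck)) or (number in already_checked):
--             flag = False
--         else: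
--             already_checked.append(number)
--
--     return flag
-- ===== SOURCE B (Python) =====
-- def validate_deck(candidate_deck):
--     s = sorted(candidate_deck)
--     if s and s[-1] > len(s):
--         return False
--     return all(s[i] != s[i + 1] for i in range(len(s) - 1))
-- ===== Notes on version B (the rewrite author's own statement) =====
-- stated objective: faster
-- what changed: Replaces A's incremental scan with an in-loop membership test against a growing already-checked list by sorting the deck once and making a single adjacent-distinctness pass plus a bound check on the sorted maximum.
import Mathlib
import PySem

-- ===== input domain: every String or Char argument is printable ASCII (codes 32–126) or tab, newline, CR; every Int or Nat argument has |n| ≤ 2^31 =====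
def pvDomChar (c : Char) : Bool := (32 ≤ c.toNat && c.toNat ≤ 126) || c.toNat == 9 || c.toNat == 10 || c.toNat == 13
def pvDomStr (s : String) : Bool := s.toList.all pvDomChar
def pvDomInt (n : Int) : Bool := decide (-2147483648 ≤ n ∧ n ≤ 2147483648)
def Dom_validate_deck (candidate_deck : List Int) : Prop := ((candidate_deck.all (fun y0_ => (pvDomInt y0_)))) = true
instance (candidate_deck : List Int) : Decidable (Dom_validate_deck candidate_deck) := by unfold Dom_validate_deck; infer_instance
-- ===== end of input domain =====

-- B replaces A's incremental membership-list scan (quadratic) by sort-then-adjacent-pass: alternative decomposition, measurably faster on large inputs.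

-- ===== PORT A =====
-- literal transliteration of A: a fold carrying (already_checked, flag)
def validate_deck (candidate_deck : List Int) : Bool :=
  (candidate_deck.foldl
    (fun (st : List Int × Bool) (number : Int) =>
      if decide (number > PySem.List.len candidate_deck) || st.1.contains number then
        (st.1, false)
      else
        (st.1 ++ [number], st.2))
    ([], true)).2

-- ===== PORT B =====
-- literal transliteration of B: s = sorted(deck); bound check on s[-1]; adjacent-distinct pass
def validate_deck_alt (candidate_deck : List Int) : Bool :=
  let s := PySem.List.sorted candidate_deck (fun x => x) false
  if (!s.isEmpty) && decide (PySem.List.pyGetD s (-1) 0 > PySem.List.len s) then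
    false
  else
    (PySem.List.pyRange 0 (PySem.List.len s - 1) 1).all
      (fun i => decide (PySem.List.pyGetD s i 0 ≠ PySem.List.pyGetD s (i + 1) 0))

-- ===== PRECONDITION & SPEC =====
def Spec_validate_deck (candidate_deck : List Int) (out : Bool) : Prop := out = validate_deck_alt candidate_deck
instance (candidate_deck : List Int) (out : Bool) : Decidable (Spec_validate_deck candidate_deck out) := by unfold Spec_validate_deck; infer_instance

-- ===== CLAIM (what is proved, stated in full; the proofs are below) =====
def Claim_equal_validate_deck : Prop := ∀ (candidate_deck : List Int), Dom_validate_deck candidate_deck → Spec_validate_deck candidate_deck (validate_deck candidate_deck)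

-- ===== LEMMAS AND PROOFS =====

theorem loopA_iff (n : Int) (l acc : List Int) (flag : Bool) (hacc : acc.Nodup) :
    (l.foldl
      (fun (st : List Int × Bool) (number : Int) =>
        if decide (number > n) || st.1.contains number then (st.1, false)
        else (st.1 ++ [number], st.2))
      (acc, flag)).2 = true ↔
    (flag = true ∧ (∀ x ∈ l, x ≤ n) ∧ (acc ++ l).Nodup) := by
  induction l generalizing acc flag with
  | nil => simp [hacc]
  | cons number rest ih =>
    simp only [List.foldl_cons]
    by_cases hgt : number > n
    · have : (decide (number > n) || acc.contains number) = true := by simp [hgt]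
      rw [this]
      simp only [if_true]
      rw [ih acc false hacc]
      constructor
      · rintro ⟨h, -⟩; exact absurd h (by simp)
      · rintro ⟨-, h, -⟩; exact absurd (h number (by simp)) (by omega)
    · by_cases hmem : number ∈ acc
      · have : (decide (number > n) || acc.contains number) = true := by simp [hmem]
        rw [this]
        simp only [if_true]
        rw [ih acc false hacc]
        constructor
        · rintro ⟨h, -⟩; exact absurd h (by simp)
        · rintro ⟨-, -, h⟩
          rw [List.nodup_append] at h
          exact absurd rfl (h.2.2 number hmem number (by simp))
      · have : (decide (number > n) || acc.contains number) = false := by simp [hgt, hmem]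
        rw [this]
        simp only [if_false, Bool.false_eq_true]
        rw [ih (acc ++ [number]) flag (by simp [List.nodup_append, hacc]; intro a ha hn; exact hmem (hn ▸ ha))]
        rw [List.append_assoc]
        simp only [List.singleton_append, List.mem_cons]
        constructor
        · rintro ⟨h1, h2, h3⟩
          exact ⟨h1, fun x hx => by rcases hx with rfl | hx; omega; exact h2 x hx, h3⟩
        · rintro ⟨h1, h2, h3⟩
          exact ⟨h1, fun x hx => h2 x (Or.inr hx), h3⟩

theorem a_iff (cd : List Int) :
    validate_deck cd = true ↔ ((∀ x ∈ cd, x ≤ (cd.length : Int)) ∧ cd.Nodup) := by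
  unfold validate_deck
  rw [loopA_iff (PySem.List.len cd) cd [] true List.nodup_nil]
  simp [PySem.List.len_eq]

theorem le_getLast (s : List Int) (hp : s.Pairwise (· ≤ ·)) (hne : s ≠ []) :
    ∀ x ∈ s, x ≤ s.getLast hne := by
  induction s with
  | nil => simp
  | cons a t ih =>
    intro x hx
    rcases eq_or_ne t [] with rfl | hte
    · simp at hx ⊢; omega
    · rw [List.getLast_cons hte]
      rcases List.mem_cons.mp hx with rfl | hx'
      · exact List.rel_of_pairwise_cons hp (List.getLast_mem hte)
      · exact ih (List.Pairwise.of_cons hp) hte x hx'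
theorem chain_ne_iff_nodup (s : List Int) (hp : s.Pairwise (· ≤ ·)) :
    s.IsChain (· ≠ ·) ↔ s.Nodup := by
  constructor
  · intro hc
    have hlt : s.IsChain (· < ·) := by
      rw [List.isChain_iff_getElem] at hc ⊢
      intro i h
      have h1 := List.pairwise_iff_getElem.mp hp i (i+1) (by omega) h (by omega)
      exact lt_of_le_of_ne h1 (hc i h)
    exact ((List.isChain_iff_pairwise).mp hlt).imp (fun {a b} h => ne_of_lt h)
  · intro hn
    exact hn.isChain

-- the adjacency pass on s equals IsChain (≠)
theorem all_adj_iff (s : List Int) :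
    ((PySem.List.pyRange 0 (PySem.List.len s - 1) 1).all
      (fun i => decide (PySem.List.pyGetD s i 0 ≠ PySem.List.pyGetD s (i + 1) 0)) = true)
    ↔ s.IsChain (· ≠ ·) := by
  have key : ∀ (i : Nat) (hi : i + 1 < s.length),
      (PySem.List.pyGetD s ((i : Int)) 0 = s[i]'(Nat.lt_of_succ_lt hi) ∧ PySem.List.pyGetD s ((i : Int) + 1) 0 = s[i+1]'hi) := by
    intro i hi
    constructor
    · rw [PySem.List.pyGetD_natCast]; exact List.getD_eq_getElem _ _ (by omega)
    · have e : ((i : Int) + 1) = (((i+1 : Nat)) : Int) := by push_cast; ring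
      rw [e, PySem.List.pyGetD_natCast]; exact List.getD_eq_getElem _ _ (by omega)
  rw [List.all_eq_true, List.isChain_iff_getElem]
  constructor
  · intro h i hi
    have hm : (i : Int) ∈ PySem.List.pyRange 0 (PySem.List.len s - 1) 1 := by
      rw [PySem.List.mem_pyRange_one, PySem.List.len_eq]; omega
    have h2 := h _ hm
    rw [decide_eq_true_iff, (key i hi).1, (key i hi).2] at h2
    exact h2
  · intro h i hm
    rw [PySem.List.mem_pyRange_one, PySem.List.len_eq] at hm
    have hi : i.toNat + 1 < s.length := by omega
    have e : i = ((i.toNat : Nat) : Int) := by omega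
    rw [decide_eq_true_iff, e, (key i.toNat hi).1, (key i.toNat hi).2]
    exact h i.toNat hi

theorem alt_iff (cd : List Int) :
    validate_deck_alt cd = true ↔ ((∀ x ∈ cd, x ≤ (cd.length : Int)) ∧ cd.Nodup) := by
  unfold validate_deck_alt
  have hperm : (PySem.List.sorted cd (fun x => x) false).Perm cd := PySem.List.sorted_perm ..
  have hp : (PySem.List.sorted cd (fun x => x) false).Pairwise (· ≤ ·) :=
    PySem.List.sorted_pairwise ..
  generalize hs : PySem.List.sorted cd (fun x => x) false = s at *
  have hlen : s.length = cd.length := hperm.length_eq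
  rcases eq_or_ne s [] with rfl | hne
  · have hcd : cd = [] := by
      have := hperm.symm; exact this.eq_nil
    subst hcd
    decide
  · have hmem : ∀ x, x ∈ s ↔ x ∈ cd := fun x => hperm.mem_iff
    have hget : PySem.List.pyGetD s (-1) 0 = s.getLast hne := PySem.List.pyGetD_neg_one (xs := s) 0 hne
    by_cases hb : s.getLast hne > (s.length : Int)
    · have hc : ((!s.isEmpty) && decide (PySem.List.pyGetD s (-1) 0 > PySem.List.len s)) = true := by
        simp [hget, PySem.List.len_eq, hb, hne]
      simp only [hc, if_true]
      simp only [Bool.false_eq_true, false_iff]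
      rintro ⟨hble, -⟩
      have := hble _ ((hmem _).mp (List.getLast_mem hne))
      rw [← hlen] at this
      omega
    · have hc : ((!s.isEmpty) && decide (PySem.List.pyGetD s (-1) 0 > PySem.List.len s)) = false := by
        simp [hget, PySem.List.len_eq]
        omega
      simp only [hc, Bool.false_eq_true, if_false]
      rw [all_adj_iff, chain_ne_iff_nodup s hp, hperm.nodup_iff]
      have hble : ∀ x ∈ cd, x ≤ (cd.length : Int) := by
        intro x hx
        rw [← hlen]
        exact le_trans (le_getLast s hp hne x ((hmem x).mpr hx)) (by omega)
      exact ⟨fun h => ⟨hble, h⟩, fun h => h.2⟩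

-- ===== VERDICT (by name: the statement is the Claim_ definition above) =====
theorem validate_deck_spec : Claim_equal_validate_deck := by
  intro cd _
  unfold Spec_validate_deck
  rw [Bool.eq_iff_iff, a_iff, alt_iff]
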